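-- pv_equiv track=rewrite | github.com/MartynovDD/checkio_tasks | home/task_005_three_words.py | words_counter
-- ===== SOURCE A (Python) =====
-- def words_counter(words):
--     """
--     Count subsequent words in a string,
--     return True if there are three words in succession,
--     otherwise return False
--     """
--     count = 0
--     for w in words.split():
--         if w.isalpha():
--             count += 1
--             if count >= 3:
--                 return True
--         else:
--             count = 0
--     return False
-- ===== SOURCE B (Python) =====
-- def words_counter(words):
--     """
--     Count subsequent words in a string,
--     return True if there are three words in succession,
--     otherwise return False
--     """
--     flags = [w.isalpha() for w in words.split()]
--     return any(a and b and c for a, b, c in zip(flags, flags[1:], flags[2:]))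
-- ===== Notes on version B (the rewrite author's own statement) =====
-- stated objective: idiomatic
-- what changed: Replaces the stateful counter-with-reset loop (with early return) by building the boolean flag list once and testing every length-3 window via zip of the list with its two shifts.
import Mathlib
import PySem

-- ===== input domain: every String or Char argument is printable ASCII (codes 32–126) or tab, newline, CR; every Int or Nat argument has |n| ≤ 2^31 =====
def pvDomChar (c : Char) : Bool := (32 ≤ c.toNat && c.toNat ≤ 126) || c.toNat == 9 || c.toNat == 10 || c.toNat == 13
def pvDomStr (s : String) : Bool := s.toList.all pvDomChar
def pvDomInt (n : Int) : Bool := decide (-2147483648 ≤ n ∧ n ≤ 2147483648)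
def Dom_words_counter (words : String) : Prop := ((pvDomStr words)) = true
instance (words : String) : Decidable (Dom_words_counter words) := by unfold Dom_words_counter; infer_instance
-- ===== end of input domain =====

-- B replaces A's counter-with-reset loop by building the isalpha flag list once and
-- testing every length-3 window via zip with two shifted slices (idiomatic rewrite, same cost).


-- ===== PORT A =====
-- loop over the split words with the running counter; the early 'return True' is the 'true' result
def wcLoop : List String → Nat → Bool
  | [], _ => false
  | w :: ws, count =>
    if PySem.Str.strIsalpha w then
      if count + 1 ≥ 3 then true else wcLoop ws (count + 1)
    else wcLoop ws 0

def words_counter (words : String) : Bool :=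
  wcLoop (PySem.Str.split₀ words) 0

-- ===== PORT B =====
-- any(a and b and c for a, b, c in zip(flags, flags[1:], flags[2:])): zip of triples is nested List.zip
def wcZip (flags : List Bool) : Bool :=
  (flags.zip ((PySem.List.slice flags (some 1) none).zip (PySem.List.slice flags (some 2) none))).any
    (fun t => t.1 && t.2.1 && t.2.2)

def words_counter_alt (words : String) : Bool :=
  wcZip ((PySem.Str.split₀ words).map PySem.Str.strIsalpha)

-- ===== PRECONDITION & SPEC =====
def Spec_words_counter (words : String) (out : Bool) : Prop := out = words_counter_alt words
instance (words : String) (out : Bool) : Decidable (Spec_words_counter words out) := by unfold Spec_words_counter; infer_instance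

-- ===== CLAIM (what is proved, stated in full; the proofs are below) =====
def Claim_equal_words_counter : Prop := ∀ (words : String), Dom_words_counter words → Spec_words_counter words (words_counter words)

-- ===== LEMMAS AND PROOFS =====

-- A's loop, specialized to the precomputed isalpha flag list
def flagLoop : List Bool → Nat → Bool
  | [], _ => false
  | b :: bs, count =>
    if b then
      if count + 1 ≥ 3 then true else flagLoop bs (count + 1)
    else flagLoop bs 0

-- "the list contains three consecutive true flags"
def run3 : List Bool → Bool
  | a :: b :: c :: rest => (a && b && c) || run3 (b :: c :: rest)
  | _ => false

theorem run3_false_cons (bs : List Bool) : run3 (false :: bs) = run3 bs := by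
  match bs with
  | [] => rfl
  | [b] => rfl
  | b :: c :: r => simp [run3]

theorem run3_tf (bs : List Bool) : run3 (true :: false :: bs) = run3 bs := by
  match bs with
  | [] => rfl
  | c :: r => simp [run3, run3_false_cons]

theorem run3_ttf (bs : List Bool) : run3 (true :: true :: false :: bs) = run3 bs := by
  simp [run3, run3_tf]

theorem wcLoop_eq_flagLoop (ws : List String) (c : Nat) :
    wcLoop ws c = flagLoop (ws.map PySem.Str.strIsalpha) c := by
  induction ws generalizing c with
  | nil => rfl
  | cons w ws ih => simp [wcLoop, flagLoop, ih]

theorem flagLoop_eq_run3 (fl : List Bool) (c : Nat) (hc : c ≤ 2) :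
    flagLoop fl c = run3 (List.replicate c true ++ fl) := by
  induction fl generalizing c with
  | nil => interval_cases c <;> rfl
  | cons b bs ih =>
    cases b with
    | true =>
      interval_cases c <;>
        simp [flagLoop, run3, ih 1 (by omega), ih 2 (by omega), List.replicate]
    | false =>
      interval_cases c <;>
        simp [flagLoop, ih 0 (by omega), run3_false_cons, run3_tf, run3_ttf, List.replicate]

theorem zip3_any_eq_run3 (fl : List Bool) :
    ((fl.zip ((fl.drop 1).zip (fl.drop 2))).any (fun t => t.1 && t.2.1 && t.2.2)) = run3 fl := by
  induction fl with
  | nil => rfl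
  | cons a bs ih =>
    match bs, ih with
    | [], _ => rfl
    | [b], _ => rfl
    | b :: c :: rest, ih =>
      simp only [List.drop, List.zip_cons_cons, List.any_cons] at *
      rw [ih]
      simp [run3]

-- ===== VERDICT (by name: the statement is the Claim_ definition above) =====
theorem words_counter_spec : Claim_equal_words_counter := by
  intro words _
  unfold Spec_words_counter words_counter words_counter_alt wcZip
  rw [PySem.List.slice_from _ (show (0:Int) ≤ 1 by omega),
      PySem.List.slice_from _ (show (0:Int) ≤ 2 by omega)]
  rw [wcLoop_eq_flagLoop, flagLoop_eq_run3 _ 0 (by omega), ← zip3_any_eq_run3]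
  rfl
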